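-- pv_equiv track=rewrite | github.com/Jxun-h/BOJ | 프로그래머스/lv2/17683. ［3차］ 방금그곡/［3차］ 방금그곡.py | get_chord
-- ===== SOURCE A (Python) =====
-- def get_chord(info):
--     chord = []
--     stack = ''
--     for i in info:
--         if chr(96) < i.lower() < chr(123) and stack == '':
--             stack += i
--         elif chr(96) < i.lower() < chr(123) and stack != '':
--             chord.append(stack)
--             stack = i
--         else:
--             stack += i
--     chord.append(stack)
--
--     return chord
-- ===== SOURCE B (Python) =====
-- def get_chord(info):
--     # back-to-front: scan in reverse collecting the current chunk's chars;
--     # a letter is the first char of its chunk, so it closes the chunk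
--     chunks = []
--     cur = []
--     for c in reversed(info):
--         cur.append(c)
--         if chr(96) < c.lower() < chr(123):
--             chunks.append(''.join(reversed(cur)))
--             cur = []
--     if cur or not chunks:
--         chunks.append(''.join(reversed(cur)))
--     chunks.reverse()
--     return chunks
-- ===== Notes on version B (the rewrite author's own statement) =====
-- stated objective: alternative
-- what changed: B builds the chunk list back-to-front with a single reverse pass (a letter closes its chunk, opening a fresh front chunk), then drops an empty leading chunk, instead of A's forward pass with a stack accumulator and conditional flush.
import Mathlib
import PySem

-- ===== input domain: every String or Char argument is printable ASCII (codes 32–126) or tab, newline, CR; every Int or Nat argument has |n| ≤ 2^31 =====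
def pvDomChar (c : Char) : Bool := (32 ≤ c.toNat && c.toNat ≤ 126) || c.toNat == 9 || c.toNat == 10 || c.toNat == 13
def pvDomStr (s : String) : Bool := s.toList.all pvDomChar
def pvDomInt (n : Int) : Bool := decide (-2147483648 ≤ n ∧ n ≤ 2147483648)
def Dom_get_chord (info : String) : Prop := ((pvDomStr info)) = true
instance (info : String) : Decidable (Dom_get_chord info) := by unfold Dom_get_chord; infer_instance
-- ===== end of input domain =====

-- B builds the chunk list back-to-front in one reverse pass instead of A's forward stack-accumulator pass; same cost, different decomposition.


-- shared helper: both Pythons contain the identical test  chr(96) < c.lower() < chr(123)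
-- (single-char string comparison = code-point comparison; lowerChar is Python's str.lower on one char)
def pvIsLetter (c : Char) : Bool :=
  96 < (PySem.Chars.lowerChar c).toNat && (PySem.Chars.lowerChar c).toNat < 123

-- ===== PORT A =====
-- strings are handled as List Char internally; String.ofList at the end
def aStep (st : List (List Char) × List Char) (c : Char) : List (List Char) × List Char :=
  if pvIsLetter c = true ∧ st.2 = [] then (st.1, st.2 ++ [c])
  else if pvIsLetter c = true ∧ st.2 ≠ [] then (st.1 ++ [st.2], [c])
  else (st.1, st.2 ++ [c])

def get_chord (info : String) : List String :=
  let st := info.toList.foldl aStep ([], [])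
  (st.1 ++ [st.2]).map String.ofList

-- ===== PORT B =====
-- reversed(info) loop = List.foldr over info.toList; state = (chunks so far, current chunk chars in reverse)
def bStep (c : Char) (st : List (List Char) × List Char) : List (List Char) × List Char :=
  let cur := st.2 ++ [c]
  if pvIsLetter c then (st.1 ++ [cur.reverse], []) else (st.1, cur)

def get_chord_alt (info : String) : List String :=
  let st := info.toList.foldr bStep ([], [])
  let chunks := if st.2 ≠ [] ∨ st.1 = [] then st.1 ++ [st.2.reverse] else st.1
  chunks.reverse.map String.ofList

-- ===== PRECONDITION & SPEC =====
def Spec_get_chord (info : String) (out : List String) : Prop := out = get_chord_alt info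
instance (info : String) (out : List String) : Decidable (Spec_get_chord info out) := by unfold Spec_get_chord; infer_instance

-- ===== CLAIM (what is proved, stated in full; the proofs are below) =====
def Claim_equal_get_chord : Prop := ∀ (info : String), Dom_get_chord info → Spec_get_chord info (get_chord info)

-- ===== LEMMAS AND PROOFS =====

-- recursive characterisation of A's loop
def goA (s : List Char) : List Char → List (List Char)
  | [] => [s]
  | c :: cs => if pvIsLetter c = true ∧ s ≠ [] then s :: goA [c] cs else goA (s ++ [c]) cs

-- front-first chunk list (proof intermediary between the two loops)
def specStep (c : Char) (acc : List (List Char)) : List (List Char) :=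
  let acc' := match acc with
    | [] => [[c]]          -- unreachable: acc is never empty
    | h :: t => (c :: h) :: t
  if pvIsLetter c then [] :: acc' else acc'

theorem specStep_cons (c : Char) (h : List Char) (t : List (List Char)) :
    specStep c (h :: t) = if pvIsLetter c = true then [] :: (c :: h) :: t else (c :: h) :: t := rfl

theorem foldl_aStep_eq_goA (cs : List Char) :
    ∀ (acc : List (List Char)) (s : List Char),
      (cs.foldl aStep (acc, s)).1 ++ [(cs.foldl aStep (acc, s)).2] = acc ++ goA s cs := by
  induction cs with
  | nil => intro acc s; simp [goA]
  | cons c cs ih =>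
    intro acc s
    simp only [List.foldl_cons, goA, aStep]
    by_cases hl : pvIsLetter c = true
    · by_cases hs : s = []
      · subst hs; simp [hl, ih]
      · simp [hl, hs, ih]
    · simp [hl, ih]

theorem foldr_specStep_ne_nil (cs : List Char) : cs.foldr specStep [[]] ≠ [] := by
  induction cs with
  | nil => simp
  | cons c cs ih =>
    simp only [List.foldr_cons, specStep]
    rcases h : cs.foldr specStep [[]] with _ | ⟨h', t'⟩
    · exact absurd h ih
    · dsimp only
      split <;> simp

theorem goA_eq_foldr (cs : List Char) :
    ∀ (s h : List Char) (t : List (List Char)), s ≠ [] →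
      cs.foldr specStep [[]] = h :: t → goA s cs = (s ++ h) :: t := by
  induction cs with
  | nil =>
    intro s h t _ hF
    simp only [List.foldr_nil] at hF
    injection hF with e1 e2; subst e1; subst e2
    simp [goA]
  | cons c cs ih =>
    intro s h t hs hF
    rcases hFcs : cs.foldr specStep [[]] with _ | ⟨h', t'⟩
    · exact absurd hFcs (foldr_specStep_ne_nil cs)
    rw [List.foldr_cons, hFcs, specStep_cons] at hF
    by_cases hl : pvIsLetter c = true
    · rw [if_pos hl] at hF
      injection hF with e1 e2; subst e1; subst e2
      simp only [goA, if_pos (And.intro hl hs)]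
      rw [ih [c] h' t' (by simp) hFcs]
      simp
    · rw [if_neg hl] at hF
      injection hF with e1 e2; subst e1; subst e2
      have hcond : ¬ (pvIsLetter c = true ∧ s ≠ []) := fun hc => hl hc.1
      simp only [goA, if_neg hcond]
      rw [ih (s ++ [c]) h' t' (by simp) hFcs]
      simp

theorem goA_nil_eq (cs : List Char) :
    goA [] cs = (match cs.foldr specStep [[]] with
      | [] :: t :: ts => t :: ts
      | l => l) := by
  cases cs with
  | nil => simp [goA]
  | cons c cs =>
    rcases hFcs : cs.foldr specStep [[]] with _ | ⟨h', t'⟩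
    · exact absurd hFcs (foldr_specStep_ne_nil cs)
    have hrec : goA [c] cs = (c :: h') :: t' := by
      simpa using goA_eq_foldr cs [c] h' t' (by simp) hFcs
    have hgo : goA [] (c :: cs) = goA [c] cs := by
      simp only [goA]
      split
      · next hc => exact absurd rfl hc.2
      · simp
    rw [List.foldr_cons, hFcs, specStep_cons, hgo, hrec]
    by_cases hl : pvIsLetter c = true
    · rw [if_pos hl]
    · rw [if_neg hl]

-- B's reversed-state loop computes the reverse of the front-first chunk list
theorem foldr_bStep_eq_spec (cs : List Char) :
    ∀ (h : List Char) (t : List (List Char)),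
      cs.foldr specStep [[]] = h :: t →
      cs.foldr bStep ([], []) = (t.reverse, h.reverse) := by
  induction cs with
  | nil =>
    intro h t hF
    simp only [List.foldr_nil] at hF
    injection hF with e1 e2; subst e1; subst e2
    simp
  | cons c cs ih =>
    intro h t hF
    rcases hFcs : cs.foldr specStep [[]] with _ | ⟨h', t'⟩
    · exact absurd hFcs (foldr_specStep_ne_nil cs)
    rw [List.foldr_cons, hFcs, specStep_cons] at hF
    rw [List.foldr_cons, ih h' t' hFcs]
    by_cases hl : pvIsLetter c = true
    · rw [if_pos hl] at hF
      injection hF with e1 e2; subst e1; subst e2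
      simp [bStep, hl, List.reverse_cons]
    · rw [if_neg hl] at hF
      injection hF with e1 e2; subst e1; subst e2
      simp [bStep, hl]

-- ===== VERDICT (by name: the statement is the Claim_ definition above) =====
theorem get_chord_spec : Claim_equal_get_chord := by
  intro info _
  show get_chord info = get_chord_alt info
  simp only [get_chord, get_chord_alt]
  have h1 := foldl_aStep_eq_goA info.toList [] []
  simp only [List.nil_append] at h1
  rcases hF : info.toList.foldr specStep [[]] with _ | ⟨h, t⟩
  · exact absurd hF (foldr_specStep_ne_nil info.toList)
  rw [h1, goA_nil_eq, hF, foldr_bStep_eq_spec info.toList h t hF]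
  by_cases hh : h = []
  · subst hh
    cases t with
    | nil => simp
    | cons t0 ts => simp
  · cases t with
    | nil => simp [hh]
    | cons t0 ts =>
      have : (h.reverse ≠ [] ∨ (t0 :: ts).reverse = []) := Or.inl (by simpa using hh)
      simp only [if_pos this]
      simp [hh]
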